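-- pv_equiv track=rewrite | github.com/BSZET-IGD-22-GANG/lf5-rie-AB2b | superdepp.py | get_valid_votes
-- ===== SOURCE A (Python) =====
-- PLAYER_COUNT = 10
--
-- def get_num(string):
--     splits = string.split('=')
--     if len(splits) != 2:
--         return None
--
--     rmv_spaces = splits[0].split(" ")
--     if (len(rmv_spaces) < 1) or (rmv_spaces[0].lower() != "superdepp"):
--         return None
--
--     rmv_spaces = splits[1].strip()
--     if not rmv_spaces.isnumeric():
--         return None
--
--     return int(rmv_spaces)
--
-- def get_valid_votes(arr):
--     invalids: int = 0
--     players = [0] * PLAYER_COUNT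
--
--     for string in arr:
--         num = get_num(string)
--         if (num is None) or (num < 1) or (num > PLAYER_COUNT):
--             invalids += 1
--         else:
--             players[num - 1] += 1
--
--     return [invalids, players]
-- ===== SOURCE B (Python) =====
-- PLAYER_COUNT = 10
--
-- def _vote(string):
--     parts = string.split('=')
--     if len(parts) == 2 and parts[0].split(' ')[0].lower() == 'superdepp':
--         tail = parts[1].strip()
--         if tail.isnumeric():
--             return int(tail)
--     return None
--
-- def get_valid_votes(arr):
--     nums = list(map(_vote, arr))
--     players = [nums.count(i) for i in range(1, PLAYER_COUNT + 1)]
--     return [len(arr) - sum(players), players]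
-- ===== Notes on version B (the rewrite author's own statement) =====
-- stated objective: alternative
-- what changed: B has no accumulator loop at all: it first maps every string to its parsed vote, then computes each player's tally as nums.count(i) (one counting scan per player slot) and derives invalids by subtraction len(arr) - sum(players), replacing A's single pass with conditional in-place increments by a map-then-count-per-bucket structure.
import Mathlib
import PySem

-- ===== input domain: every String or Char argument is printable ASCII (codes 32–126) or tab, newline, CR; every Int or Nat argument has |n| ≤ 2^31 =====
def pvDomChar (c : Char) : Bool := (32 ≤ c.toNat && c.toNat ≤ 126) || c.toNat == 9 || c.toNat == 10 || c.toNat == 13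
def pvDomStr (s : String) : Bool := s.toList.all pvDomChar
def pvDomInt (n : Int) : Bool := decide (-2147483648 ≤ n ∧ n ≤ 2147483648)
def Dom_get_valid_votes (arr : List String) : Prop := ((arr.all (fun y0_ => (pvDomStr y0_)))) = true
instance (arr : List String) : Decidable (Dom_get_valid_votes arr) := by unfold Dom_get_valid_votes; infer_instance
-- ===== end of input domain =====

-- B removes A's accumulator loop: it maps every string to its parsed vote, counts each
-- player's tally with a per-slot counting scan, and derives invalids by subtraction.

def PLAYER_COUNT : Int := 10

-- ===== PORT A =====
-- get_num: early-return chain; '.isnumeric' ported as strIsdigit (exact on the ASCII domain,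
-- where isnumeric and isdigit coincide); split? with a nonempty separator is always 'some'.
def get_num (string : String) : Option Int :=
  match PySem.Str.split? string "=" with
  | some [s0, s1] =>                                 -- len(splits) == 2, splits[0]/splits[1]
    match PySem.Str.split? s0 " " with
    | some [] => none                                -- len(rmv_spaces) < 1
    | some (w :: _) =>                               -- rmv_spaces[0]
      if PySem.Str.lower w ≠ "superdepp" then none
      else
        let r := PySem.Str.strip s1
        if ¬ PySem.Str.strIsdigit r then none
        else PySem.Int.ofStr? r                      -- int(r); some _ since r is all digits
    | none => none                                   -- unreachable: separator " " is nonempty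
  | _ => none                                        -- len(splits) != 2

def get_valid_votes (arr : List String) : Int × List Int :=
  arr.foldl
    (fun (st : Int × List Int) string =>
      match get_num string with
      | none => (st.1 + 1, st.2)
      | some num =>
        if num < 1 ∨ num > PLAYER_COUNT then (st.1 + 1, st.2)
        else (st.1, PySem.List.pySetD st.2 (num - 1) (PySem.List.pyGetD st.2 (num - 1) 0 + 1)))
    (0, List.replicate PLAYER_COUNT.toNat 0)

-- ===== PORT B =====
-- _vote: one guarded conjunction instead of early returns; parts[0].split(' ')[0] is headD ""
-- (split by a nonempty separator never returns none or []).
def pvVote (string : String) : Option Int :=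
  match PySem.Str.split? string "=" with
  | some [p0, p1] =>
    if PySem.Str.lower (((PySem.Str.split? p0 " ").getD []).headD "") = "superdepp" then
      let tail := PySem.Str.strip p1
      if PySem.Str.strIsdigit tail then PySem.Int.ofStr? tail else none
    else none
  | _ => none

def get_valid_votes_alt (arr : List String) : Int × List Int :=
  let nums := arr.map pvVote                                 -- nums = list(map(_vote, arr))
  let players := (PySem.List.pyRange 1 (PLAYER_COUNT + 1) 1).map
    (fun i => ((PySem.List.count nums (some i) : Nat) : Int))  -- [nums.count(i) for i in range(1, 11)]
  ((arr.length : Int) - players.sum, players)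

-- ===== PRECONDITION & SPEC =====
def Spec_get_valid_votes (arr : List String) (out : Int × List Int) : Prop := out = get_valid_votes_alt arr
instance (arr : List String) (out : Int × List Int) : Decidable (Spec_get_valid_votes arr out) := by unfold Spec_get_valid_votes; infer_instance

-- ===== CLAIM (what is proved, stated in full; the proofs are below) =====
def Claim_equal_get_valid_votes : Prop := ∀ (arr : List String), Dom_get_valid_votes arr → Spec_get_valid_votes arr (get_valid_votes arr)

-- ===== LEMMAS AND PROOFS =====

-- the two parsers agree
theorem get_num_eq_pvVote (s : String) : get_num s = pvVote s := by
  unfold get_num pvVote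
  cases hs : PySem.Str.split? s "=" with
  | none => rfl
  | some l =>
    match l with
    | [] => rfl
    | [_] => rfl
    | _ :: _ :: _ :: _ => rfl
    | [a, b] =>
      cases h : PySem.Str.split? a " " with
      | none => simp [h]; exact fun hc _ => absurd hc (by decide)
      | some ws =>
        cases ws with
        | nil => simp [h]; exact fun hc _ => absurd hc (by decide)
        | cons w rest => simp [h]; split_ifs <;> simp_all

-- shorthand for the per-slot tally of a parsed-vote list (proof-only)
def pvC (nums : List (Option Int)) (i : Int) : Int := (PySem.List.count nums (some i) : Nat)

theorem pvC_cons (v : Option Int) (nums : List (Option Int)) (i : Int) :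
    pvC (v :: nums) i = pvC nums i + (if v = some i then 1 else 0) := by
  unfold pvC
  simp only [PySem.List.count_eq, List.count_cons]
  by_cases h : v = some i <;> simp [h]

-- loop invariant: A's fold from any 10-slot state is B's per-slot counts added on top,
-- with the invalid counter advanced by (number of strings) − (number of in-range valid votes)
theorem pvLoop (arr : List String) :
    ∀ (inv a1 a2 a3 a4 a5 a6 a7 a8 a9 a10 : Int),
    arr.foldl
      (fun (st : Int × List Int) string =>
        match get_num string with
        | none => (st.1 + 1, st.2)
        | some num =>
          if num < 1 ∨ num > PLAYER_COUNT then (st.1 + 1, st.2)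
          else (st.1, PySem.List.pySetD st.2 (num - 1) (PySem.List.pyGetD st.2 (num - 1) 0 + 1)))
      (inv, [a1, a2, a3, a4, a5, a6, a7, a8, a9, a10])
    = (inv + (arr.length : Int)
        - (pvC (arr.map pvVote) 1 + pvC (arr.map pvVote) 2 + pvC (arr.map pvVote) 3
          + pvC (arr.map pvVote) 4 + pvC (arr.map pvVote) 5 + pvC (arr.map pvVote) 6
          + pvC (arr.map pvVote) 7 + pvC (arr.map pvVote) 8 + pvC (arr.map pvVote) 9
          + pvC (arr.map pvVote) 10),
       [a1 + pvC (arr.map pvVote) 1, a2 + pvC (arr.map pvVote) 2, a3 + pvC (arr.map pvVote) 3,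
        a4 + pvC (arr.map pvVote) 4, a5 + pvC (arr.map pvVote) 5, a6 + pvC (arr.map pvVote) 6,
        a7 + pvC (arr.map pvVote) 7, a8 + pvC (arr.map pvVote) 8, a9 + pvC (arr.map pvVote) 9,
        a10 + pvC (arr.map pvVote) 10]) := by
  induction arr with
  | nil => intro inv a1 a2 a3 a4 a5 a6 a7 a8 a9 a10; simp [pvC]
  | cons s t ih =>
    intro inv a1 a2 a3 a4 a5 a6 a7 a8 a9 a10
    have hg := get_num_eq_pvVote s
    simp only [List.foldl_cons, List.map_cons, hg]
    cases hv : pvVote s with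
    | none =>
      simp only [ih (inv + 1), pvC_cons, List.length_cons]
      rw [Prod.mk.injEq]
      simp
      ring
    | some n =>
      by_cases hr : n < 1 ∨ n > PLAYER_COUNT
      · simp only [if_pos hr, pvC_cons, ih (inv + 1)]
        have hne : ∀ i : Int, 1 ≤ i → i ≤ 10 → ¬ (some n = some i) := by
          intro i h1 h2 hc
          unfold PLAYER_COUNT at hr
          injection hc with hc; omega
        simp only [List.length_cons]
        rw [if_neg (hne 1 (by norm_num) (by norm_num)), if_neg (hne 2 (by norm_num) (by norm_num)),
            if_neg (hne 3 (by norm_num) (by norm_num)), if_neg (hne 4 (by norm_num) (by norm_num)),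
            if_neg (hne 5 (by norm_num) (by norm_num)), if_neg (hne 6 (by norm_num) (by norm_num)),
            if_neg (hne 7 (by norm_num) (by norm_num)), if_neg (hne 8 (by norm_num) (by norm_num)),
            if_neg (hne 9 (by norm_num) (by norm_num)), if_neg (hne 10 (by norm_num) (by norm_num))]
        rw [Prod.mk.injEq]
        norm_num
        ring
      · have h1 : 1 ≤ n := by unfold PLAYER_COUNT at hr; omega
        have h10 : n ≤ 10 := by unfold PLAYER_COUNT at hr; omega
        simp only [if_neg hr, pvC_cons]
        interval_cases n
        · have hset : PySem.List.pySetD [a1, a2, a3, a4, a5, a6, a7, a8, a9, a10] ((1:Int)-1) (PySem.List.pyGetD [a1, a2, a3, a4, a5, a6, a7, a8, a9, a10] ((1:Int)-1) 0 + 1) = [a1 + 1, a2, a3, a4, a5, a6, a7, a8, a9, a10] := by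
            simp [PySem.List.pySetD_of_nonneg, PySem.List.pyGetD_ofNat']
          rw [hset, ih, Prod.mk.injEq]
          norm_num
          and_intros <;> ring
        · have hset : PySem.List.pySetD [a1, a2, a3, a4, a5, a6, a7, a8, a9, a10] ((2:Int)-1) (PySem.List.pyGetD [a1, a2, a3, a4, a5, a6, a7, a8, a9, a10] ((2:Int)-1) 0 + 1) = [a1, a2 + 1, a3, a4, a5, a6, a7, a8, a9, a10] := by
            simp [PySem.List.pySetD_of_nonneg, PySem.List.pyGetD_ofNat']
          rw [hset, ih, Prod.mk.injEq]
          norm_num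
          and_intros <;> ring
        · have hset : PySem.List.pySetD [a1, a2, a3, a4, a5, a6, a7, a8, a9, a10] ((3:Int)-1) (PySem.List.pyGetD [a1, a2, a3, a4, a5, a6, a7, a8, a9, a10] ((3:Int)-1) 0 + 1) = [a1, a2, a3 + 1, a4, a5, a6, a7, a8, a9, a10] := by
            simp [PySem.List.pySetD_of_nonneg, PySem.List.pyGetD_ofNat']
          rw [hset, ih, Prod.mk.injEq]
          norm_num
          and_intros <;> ring
        · have hset : PySem.List.pySetD [a1, a2, a3, a4, a5, a6, a7, a8, a9, a10] ((4:Int)-1) (PySem.List.pyGetD [a1, a2, a3, a4, a5, a6, a7, a8, a9, a10] ((4:Int)-1) 0 + 1) = [a1, a2, a3, a4 + 1, a5, a6, a7, a8, a9, a10] := by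
            simp [PySem.List.pySetD_of_nonneg, PySem.List.pyGetD_ofNat']
          rw [hset, ih, Prod.mk.injEq]
          norm_num
          and_intros <;> ring
        · have hset : PySem.List.pySetD [a1, a2, a3, a4, a5, a6, a7, a8, a9, a10] ((5:Int)-1) (PySem.List.pyGetD [a1, a2, a3, a4, a5, a6, a7, a8, a9, a10] ((5:Int)-1) 0 + 1) = [a1, a2, a3, a4, a5 + 1, a6, a7, a8, a9, a10] := by
            simp [PySem.List.pySetD_of_nonneg, PySem.List.pyGetD_ofNat']
          rw [hset, ih, Prod.mk.injEq]
          norm_num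
          and_intros <;> ring
        · have hset : PySem.List.pySetD [a1, a2, a3, a4, a5, a6, a7, a8, a9, a10] ((6:Int)-1) (PySem.List.pyGetD [a1, a2, a3, a4, a5, a6, a7, a8, a9, a10] ((6:Int)-1) 0 + 1) = [a1, a2, a3, a4, a5, a6 + 1, a7, a8, a9, a10] := by
            simp [PySem.List.pySetD_of_nonneg, PySem.List.pyGetD_ofNat']
          rw [hset, ih, Prod.mk.injEq]
          norm_num
          and_intros <;> ring
        · have hset : PySem.List.pySetD [a1, a2, a3, a4, a5, a6, a7, a8, a9, a10] ((7:Int)-1) (PySem.List.pyGetD [a1, a2, a3, a4, a5, a6, a7, a8, a9, a10] ((7:Int)-1) 0 + 1) = [a1, a2, a3, a4, a5, a6, a7 + 1, a8, a9, a10] := by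
            simp [PySem.List.pySetD_of_nonneg, PySem.List.pyGetD_ofNat']
          rw [hset, ih, Prod.mk.injEq]
          norm_num
          and_intros <;> ring
        · have hset : PySem.List.pySetD [a1, a2, a3, a4, a5, a6, a7, a8, a9, a10] ((8:Int)-1) (PySem.List.pyGetD [a1, a2, a3, a4, a5, a6, a7, a8, a9, a10] ((8:Int)-1) 0 + 1) = [a1, a2, a3, a4, a5, a6, a7, a8 + 1, a9, a10] := by
            simp [PySem.List.pySetD_of_nonneg, PySem.List.pyGetD_ofNat']
          rw [hset, ih, Prod.mk.injEq]
          norm_num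
          and_intros <;> ring
        · have hset : PySem.List.pySetD [a1, a2, a3, a4, a5, a6, a7, a8, a9, a10] ((9:Int)-1) (PySem.List.pyGetD [a1, a2, a3, a4, a5, a6, a7, a8, a9, a10] ((9:Int)-1) 0 + 1) = [a1, a2, a3, a4, a5, a6, a7, a8, a9 + 1, a10] := by
            simp [PySem.List.pySetD_of_nonneg, PySem.List.pyGetD_ofNat']
          rw [hset, ih, Prod.mk.injEq]
          norm_num
          and_intros <;> ring
        · have hset : PySem.List.pySetD [a1, a2, a3, a4, a5, a6, a7, a8, a9, a10] ((10:Int)-1) (PySem.List.pyGetD [a1, a2, a3, a4, a5, a6, a7, a8, a9, a10] ((10:Int)-1) 0 + 1) = [a1, a2, a3, a4, a5, a6, a7, a8, a9, a10 + 1] := by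
            simp [PySem.List.pySetD_of_nonneg, PySem.List.pyGetD_ofNat']
          rw [hset, ih, Prod.mk.injEq]
          norm_num
          and_intros <;> ring

-- ===== VERDICT (by name: the statement is the Claim_ definition above) =====
theorem get_valid_votes_spec : Claim_equal_get_valid_votes := by
  intro arr _
  show get_valid_votes arr = get_valid_votes_alt arr
  unfold get_valid_votes get_valid_votes_alt
  have hrep : List.replicate PLAYER_COUNT.toNat (0:Int) = [0,0,0,0,0,0,0,0,0,0] := by decide
  have hrng : PySem.List.pyRange 1 (PLAYER_COUNT + 1) 1 = [1,2,3,4,5,6,7,8,9,10] := by decide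
  rw [hrep, pvLoop arr 0]
  simp only [hrng, List.map_cons, List.map_nil, List.sum_cons, List.sum_nil,
    PySem.List.count_eq]
  rw [Prod.mk.injEq]
  constructor
  · show _ = (arr.length:Int) - _
    unfold pvC
    simp only [PySem.List.count_eq]
    ring
  · unfold pvC
    simp only [PySem.List.count_eq]
    norm_num
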